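-- pv_equiv track=rewrite | github.com/Gleethos/NARU | utility/net_analysis.py | choice_avg
-- ===== SOURCE A (Python) =====
-- def choice_avg(matrix: list, sizes: list):
--     total_counts = [0] *len(sizes)
--     for row in matrix:
--         for i, e in enumerate(row):
--             if e >= 0: total_counts[i] += 1
--
--     # Now we create a dict for every layer to count relative occurrences!
--     relative_counts = [{i: 0 for i in range(s)} for s in sizes]
--     # Let's count the relative occurrences:
--     for row in matrix:
--         for i, e in enumerate(row):
--             if e >= 0: relative_counts[i][e] += 1
--
--     assert len(relative_counts) == len(total_counts)
--     return relative_counts, total_counts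
-- ===== SOURCE B (Python) =====
-- def choice_avg(matrix: list, sizes: list):
--     # Single counting pass over the matrix; the per-layer totals are then
--     # derived as the sum of each layer's relative-count dict, so the separate
--     # total_counts scanning pass of the original disappears.
--     relative_counts = [{i: 0 for i in range(s)} for s in sizes]
--     for row in matrix:
--         for i, e in enumerate(row):
--             if e >= 0:
--                 relative_counts[i][e] += 1
--     total_counts = [sum(d.values()) for d in relative_counts]
--     assert len(relative_counts) == len(total_counts)
--     return relative_counts, total_counts
-- ===== Notes on version B (the rewrite author's own statement) =====
-- stated objective: simpler
-- what changed: B drops A's separate full total-counting scan of the matrix: it does one counting pass filling the per-layer dicts and then derives total_counts as the sum of each dict's values.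
import Mathlib
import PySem

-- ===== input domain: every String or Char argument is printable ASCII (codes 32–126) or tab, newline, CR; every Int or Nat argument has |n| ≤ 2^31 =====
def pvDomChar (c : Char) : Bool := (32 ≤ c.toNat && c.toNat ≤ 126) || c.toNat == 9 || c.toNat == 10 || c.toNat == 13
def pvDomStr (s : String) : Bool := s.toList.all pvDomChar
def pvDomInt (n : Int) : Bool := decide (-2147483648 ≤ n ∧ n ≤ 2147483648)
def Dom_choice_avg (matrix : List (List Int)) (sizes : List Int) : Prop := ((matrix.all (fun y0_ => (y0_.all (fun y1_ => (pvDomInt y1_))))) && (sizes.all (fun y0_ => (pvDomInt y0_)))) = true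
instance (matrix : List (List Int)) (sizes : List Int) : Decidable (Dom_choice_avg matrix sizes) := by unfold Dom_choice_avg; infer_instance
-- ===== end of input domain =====

-- B replaces A's separate total-counting scan of the matrix by a single counting
-- pass over the dicts, deriving total_counts as the sum of each dict's values (simpler).


-- ===== PORT A =====
-- xs[i] = f(xs[i]) for a Nat index known (by Pre_) to be in range; no-op out of range
def pvUpd {α : Type} (xs : List α) (i : Nat) (f : α → α) : List α :=
  match xs, i with
  | [], _ => []
  | x :: xs, 0 => f x :: xs
  | x :: xs, n + 1 => x :: pvUpd xs n f

-- {i: 0 for i in range(s)}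
def pvInitDict (s : Int) : PySem.Dict Int Int :=
  (PySem.List.pyRange 0 s 1).foldl (fun d i => d.insert i 0) PySem.Dict.empty

-- loop body of 'for i, e in enumerate(row): if e >= 0: total_counts[i] += 1'
def pvTStep (t : List Int) (p : Int × Int) : List Int :=
  if p.2 ≥ 0 then pvUpd t p.1.toNat (· + 1) else t

-- loop body of 'for i, e in enumerate(row): if e >= 0: relative_counts[i][e] += 1'
-- (Python raises KeyError on a missing key; Dict.modify defaults to 0 there — Pre_ excludes it)
def pvRStep (r : List (PySem.Dict Int Int)) (p : Int × Int) : List (PySem.Dict Int Int) :=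
  if p.2 ≥ 0 then pvUpd r p.1.toNat (fun d => d.modify p.2 0 (· + 1)) else r

def choice_avg (matrix : List (List Int)) (sizes : List Int) : (List (List (Int × Int))) × List Int :=
  let total_counts := matrix.foldl (fun t row => (PySem.List.enumerate row).foldl pvTStep t)
    (List.replicate sizes.length 0)
  let relative_counts := sizes.map pvInitDict
  let relative_counts := matrix.foldl (fun r row => (PySem.List.enumerate row).foldl pvRStep r)
    relative_counts
  -- the assert compares two equal lengths and always passes
  (relative_counts.map PySem.Dict.items, total_counts)

-- ===== PORT B =====
def choice_avg_alt (matrix : List (List Int)) (sizes : List Int) : (List (List (Int × Int))) × List Int :=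
  let relative_counts := matrix.foldl (fun r row => (PySem.List.enumerate row).foldl pvRStep r)
    (sizes.map pvInitDict)
  let total_counts := relative_counts.map (fun d => d.values.sum)
  (relative_counts.map PySem.Dict.items, total_counts)

-- ===== PRECONDITION & SPEC =====
-- Pre_ excludes exactly the inputs where A raises: a nonnegative entry at a column
-- index ≥ len(sizes) (IndexError) or with value e outside range(sizes[i]) (KeyError).
def Pre_choice_avg (matrix : List (List Int)) (sizes : List Int) : Prop :=
  ∀ row ∈ matrix, ∀ p ∈ PySem.List.enumerate row, 0 ≤ p.2 →
    p.1 < (sizes.length : Int) ∧ p.2 < PySem.List.pyGetD sizes p.1 0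
instance (matrix : List (List Int)) (sizes : List Int) : Decidable (Pre_choice_avg matrix sizes) := by unfold Pre_choice_avg; infer_instance

def pvWitness_choice_avg : List (List Int) × List Int := ([[0, 1], [1, -1], [0, 2]], [2, 3])

def Spec_choice_avg (matrix : List (List Int)) (sizes : List Int) (out : (List (List (Int × Int))) × List Int) : Prop := out = choice_avg_alt matrix sizes
instance (matrix : List (List Int)) (sizes : List Int) (out : (List (List (Int × Int))) × List Int) : Decidable (Spec_choice_avg matrix sizes out) := by unfold Spec_choice_avg; infer_instance

-- ===== CLAIM (what is proved, stated in full; the proofs are below) =====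
def Claim_equal_choice_avg : Prop := ∀ (matrix : List (List Int)) (sizes : List Int), Dom_choice_avg matrix sizes → Pre_choice_avg matrix sizes → Spec_choice_avg matrix sizes (choice_avg matrix sizes)

-- ===== LEMMAS AND PROOFS =====

def pvSumv (d : PySem.Dict Int Int) : Int := d.values.sum

-- invariant carried through the counting fold: right length, and every dict still
-- has exactly the keys range(sizes[j]) it was initialised with
def pvInv (sizes : List Int) (r : List (PySem.Dict Int Int)) : Prop :=
  r.length = sizes.length ∧
  ∀ j (hj : j < r.length), (r[j]).keys = PySem.List.pyRange 0 (sizes.getD j 0) 1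

theorem pvUpd_length {α : Type} (xs : List α) (i : Nat) (f : α → α) :
    (pvUpd xs i f).length = xs.length := by
  induction xs generalizing i with
  | nil => rfl
  | cons x xs ih => cases i with
    | zero => rfl
    | succ n => simp [pvUpd, ih]

theorem pvUpd_getElem {α : Type} (xs : List α) (i : Nat) (f : α → α) (j : Nat)
    (hj : j < (pvUpd xs i f).length) :
    (pvUpd xs i f)[j] = if j = i then f (xs[j]'(by rw [pvUpd_length] at hj; exact hj))
      else xs[j]'(by rw [pvUpd_length] at hj; exact hj) := by
  induction xs generalizing i j with
  | nil => simp [pvUpd] at hj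
  | cons x xs ih =>
    cases i with
    | zero => cases j with
      | zero => rfl
      | succ m => simp [pvUpd]
    | succ n => cases j with
      | zero => simp [pvUpd]
      | succ m =>
        simp only [pvUpd, List.getElem_cons_succ]
        rw [ih]
        simp

theorem pv_sum_map_update (l : List Int) (f : Int → Int) (e : Int)
    (he : e ∈ l) (hnd : l.Nodup) :
    (l.map (fun k => if k = e then f k + 1 else f k)).sum = (l.map f).sum + 1 := by
  induction l with
  | nil => simp at he
  | cons x xs ih =>
    rcases List.mem_cons.mp he with h | h
    · subst h
      have hx : e ∉ xs := (List.nodup_cons.mp hnd).1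
      have : xs.map (fun k => if k = e then f k + 1 else f k) = xs.map f := by
        apply List.map_congr_left
        intro k hk
        have : k ≠ e := fun hke => hx (hke ▸ hk)
        simp [this]
      simp [this]; ring
    · have hx : x ≠ e := fun hxe => (List.nodup_cons.mp hnd).1 (hxe ▸ h)
      simp only [List.map_cons, List.sum_cons, if_neg hx,
        ih h (List.nodup_cons.mp hnd).2]
      ring

theorem pvSumv_modify (d : PySem.Dict Int Int) (e : Int)
    (hnd : d.keys.Nodup) (he : e ∈ d.keys) :
    pvSumv (d.modify e 0 (· + 1)) = pvSumv d + 1 := by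
  have hc : d.contains e = true := (PySem.Dict.contains_iff_mem_keys d e).mpr he
  have hkeys : (d.modify e 0 (· + 1)).keys = d.keys := by
    rw [PySem.Dict.keys_modify, PySem.Dict.keys_insert_of_contains _ _ hc]
  have hnd' : (d.modify e 0 (· + 1)).keys.Nodup := hkeys ▸ hnd
  unfold pvSumv
  rw [PySem.Dict.values_eq_map_keys _ hnd' 0, PySem.Dict.values_eq_map_keys d hnd 0, hkeys]
  have : d.keys.map (fun k => (d.modify e 0 (· + 1)).getD k 0)
      = d.keys.map (fun k => if k = e then d.getD e 0 + 1 else d.getD k 0) := by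
    apply List.map_congr_left
    intro k _
    rw [PySem.Dict.getD_modify]
  rw [this]
  have := pv_sum_map_update d.keys (fun k => d.getD k 0) e he hnd
  simp only at this ⊢
  rw [← this]
  apply congrArg
  apply List.map_congr_left
  intro k _
  by_cases hk : k = e <;> simp [hk]

theorem pv_keys_modify_contained (d : PySem.Dict Int Int) (e : Int) (f : Int → Int)
    (hc : d.contains e = true) : (d.modify e 0 f).keys = d.keys := by
  rw [PySem.Dict.keys_modify, PySem.Dict.keys_insert_of_contains _ _ hc]

theorem pv_step_comm (sizes : List Int) (r : List (PySem.Dict Int Int)) (p : Int × Int)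
    (hInv : pvInv sizes r) (hp : 0 ≤ p.2 → p.1 < (sizes.length : Int) ∧ p.2 < PySem.List.pyGetD sizes p.1 0)
    (hp1 : 0 ≤ p.1) :
    pvTStep (r.map pvSumv) p = (pvRStep r p).map pvSumv ∧ pvInv sizes (pvRStep r p) := by
  obtain ⟨hlen, hkeys⟩ := hInv
  by_cases he : p.2 ≥ 0
  · obtain ⟨hi, hv⟩ := hp he
    have hiN : p.1.toNat < r.length := by omega
    have hget : PySem.List.pyGetD sizes p.1 0 = sizes.getD p.1.toNat 0 := by
      rw [PySem.List.pyGetD_eq_getElem _ _ hp1 (by omega)]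
      rw [List.getD_eq_getElem _ _ (by omega)]
    have hkr : (r[p.1.toNat]).keys = PySem.List.pyRange 0 (sizes.getD p.1.toNat 0) 1 :=
      hkeys p.1.toNat hiN
    have hmem : p.2 ∈ (r[p.1.toNat]).keys := by
      rw [hkr, PySem.List.mem_pyRange_one]
      constructor
      · exact he
      · rw [← hget]; exact hv
    have hnd : (r[p.1.toNat]).keys.Nodup := by
      rw [hkr]; exact PySem.List.nodup_pyRange_one 0 _
    constructor
    · unfold pvTStep pvRStep
      rw [if_pos he, if_pos he]
      apply List.ext_getElem
      · simp [pvUpd_length]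
      · intro j h1 h2
        rw [pvUpd_getElem, List.getElem_map, List.getElem_map, pvUpd_getElem]
        by_cases hj : j = p.1.toNat
        · subst hj
          rw [if_pos rfl, if_pos rfl]
          exact (pvSumv_modify _ _ hnd hmem).symm
        · rw [if_neg hj, if_neg hj]
    · unfold pvRStep
      rw [if_pos he]
      refine ⟨by rw [pvUpd_length]; exact hlen, ?_⟩
      intro j hj
      rw [pvUpd_length] at hj
      rw [pvUpd_getElem]
      by_cases hjj : j = p.1.toNat
      · subst hjj
        rw [if_pos rfl]
        rw [pv_keys_modify_contained _ _ _ ((PySem.Dict.contains_iff_mem_keys _ _).mpr hmem)]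
        exact hkeys _ hj
      · rw [if_neg hjj]; exact hkeys _ hj
  · unfold pvTStep pvRStep
    rw [if_neg he, if_neg he]
    exact ⟨rfl, hlen, hkeys⟩

theorem pv_inner (sizes : List Int) (ps : List (Int × Int))
    (hp : ∀ p ∈ ps, 0 ≤ p.2 → p.1 < (sizes.length : Int) ∧ p.2 < PySem.List.pyGetD sizes p.1 0)
    (hp1 : ∀ p ∈ ps, 0 ≤ p.1) :
    ∀ r, pvInv sizes r →
      ps.foldl pvTStep (r.map pvSumv) = (ps.foldl pvRStep r).map pvSumv ∧
      pvInv sizes (ps.foldl pvRStep r) := by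
  induction ps with
  | nil => intro r h; exact ⟨rfl, h⟩
  | cons p ps ih =>
    intro r hInv
    obtain ⟨hcomm, hInv'⟩ := pv_step_comm sizes r p hInv
      (hp p (List.mem_cons_self ..)) (hp1 p (List.mem_cons_self ..))
    simp only [List.foldl_cons, hcomm]
    exact ih (fun q hq => hp q (List.mem_cons_of_mem _ hq))
      (fun q hq => hp1 q (List.mem_cons_of_mem _ hq)) _ hInv'

theorem pv_enum_fst_nonneg (row : List Int) (p : Int × Int)
    (hp : p ∈ PySem.List.enumerate row) : 0 ≤ p.1 := by
  have : p.1 ∈ (PySem.List.enumerate row).map (·.1) := List.mem_map_of_mem hp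
  rw [PySem.List.map_fst_enumerate] at this
  have := (PySem.List.mem_pyRange_one.mp this).1
  omega

theorem pv_outer (sizes : List Int) (matrix : List (List Int))
    (hm : ∀ row ∈ matrix, ∀ p ∈ PySem.List.enumerate row, 0 ≤ p.2 →
      p.1 < (sizes.length : Int) ∧ p.2 < PySem.List.pyGetD sizes p.1 0) :
    ∀ r, pvInv sizes r →
      matrix.foldl (fun t row => (PySem.List.enumerate row).foldl pvTStep t) (r.map pvSumv)
      = (matrix.foldl (fun r row => (PySem.List.enumerate row).foldl pvRStep r) r).map pvSumv := by
  induction matrix with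
  | nil => intro r _; rfl
  | cons row rest ih =>
    intro r hInv
    obtain ⟨hcomm, hInv'⟩ := pv_inner sizes (PySem.List.enumerate row)
      (hm row (List.mem_cons_self ..))
      (fun p hp => pv_enum_fst_nonneg row p hp) r hInv
    simp only [List.foldl_cons, hcomm]
    exact ih (fun q hq => hm q (List.mem_cons_of_mem _ hq)) _ hInv'

theorem pv_init_items (s : Int) :
    (pvInitDict s).items = (PySem.List.pyRange 0 s 1).map (fun i => (i, (0 : Int))) := by
  unfold pvInitDict
  have := PySem.Dict.items_foldl_insert_fresh (PySem.List.pyRange 0 s 1)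
    (fun i => i) (fun _ => (0 : Int)) PySem.Dict.empty
    (fun a _ => PySem.Dict.contains_empty a)
    (by simpa using PySem.List.nodup_pyRange_one 0 s)
  simpa using this

theorem pv_init_keys (s : Int) : (pvInitDict s).keys = PySem.List.pyRange 0 s 1 := by
  have : (pvInitDict s).keys = (pvInitDict s).items.map (·.1) := rfl
  rw [this, pv_init_items]
  simp [Function.comp_def]

theorem pv_init_sumv (s : Int) : pvSumv (pvInitDict s) = 0 := by
  unfold pvSumv
  have : (pvInitDict s).values = (pvInitDict s).items.map (·.2) := rfl
  rw [this, pv_init_items]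
  simp [Function.comp_def]

theorem pv_init_inv (sizes : List Int) : pvInv sizes (sizes.map pvInitDict) := by
  refine ⟨by simp, ?_⟩
  intro j hj
  simp only [List.length_map] at hj
  rw [List.getElem_map, pv_init_keys, List.getD_eq_getElem _ _ hj]

theorem pv_init_map_sumv (sizes : List Int) :
    (sizes.map pvInitDict).map pvSumv = List.replicate sizes.length 0 := by
  rw [List.map_map]
  rw [List.eq_replicate_iff]
  constructor
  · simp
  · intro b hb
    simp only [List.mem_map] at hb
    obtain ⟨s, _, hs⟩ := hb
    rw [← hs]
    exact pv_init_sumv s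

-- ===== VERDICT (by name: the statement is the Claim_ definition above) =====
theorem choice_avg_spec : Claim_equal_choice_avg := by
  intro matrix sizes _ hpre
  unfold Spec_choice_avg choice_avg choice_avg_alt
  have h := pv_outer sizes matrix hpre (sizes.map pvInitDict) (pv_init_inv sizes)
  rw [pv_init_map_sumv] at h
  simp only [h]
  rfl
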